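-- pv_equiv track=rewrite | github.com/Zhakupovaadiya/homework- | lab 1/main.py | group_by_parity_and_sort
-- ===== SOURCE A (Python) =====
-- def group_by_parity_and_sort(nums):
--     evens = []
--     odds = []
--     for num in nums:
--         if num % 2 == 0:
--             evens.append(num)
--         else:
--             odds.append(num)
--     for arr in (evens, odds):
--         n = len(arr)
--         for i in range(n):
--             for j in range(0,n-i-1):
--                 if arr[j]>arr[j+1]:
--                     arr[j], arr[j+1] = arr[j+1], arr[j]
--     return evens+odds
-- ===== SOURCE B (Python) =====
-- def group_by_parity_and_sort(nums):
--     s = sorted(nums)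
--     evens = [x for x in s if x % 2 == 0]
--     odds = [x for x in s if x % 2 != 0]
--     return evens + odds
-- ===== Notes on version B (the rewrite author's own statement) =====
-- stated objective: faster
-- what changed: A partitions first and bubble-sorts each group with nested index loops; B sorts the whole list once with the built-in sort and then builds the result by two filtering passes over the sorted list.
import Mathlib
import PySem

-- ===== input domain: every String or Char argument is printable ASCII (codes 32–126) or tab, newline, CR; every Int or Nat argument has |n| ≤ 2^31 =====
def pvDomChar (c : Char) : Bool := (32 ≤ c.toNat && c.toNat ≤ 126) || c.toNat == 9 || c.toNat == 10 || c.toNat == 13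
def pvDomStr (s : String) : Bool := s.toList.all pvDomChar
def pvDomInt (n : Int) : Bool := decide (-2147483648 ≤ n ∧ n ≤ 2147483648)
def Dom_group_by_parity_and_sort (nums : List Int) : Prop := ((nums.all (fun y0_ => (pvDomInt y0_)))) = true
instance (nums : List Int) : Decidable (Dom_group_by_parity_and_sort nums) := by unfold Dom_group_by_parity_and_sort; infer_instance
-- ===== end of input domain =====

-- B replaces A's partition-then-bubble-sort-each-group by one global sort followed by two
-- filtering passes (objective: faster).

-- ===== PORT A =====
-- one bubble-sort comparison/swap at indices j, j+1 (indices are always in range in A's loops,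
-- so getD's default is never read)
def bubStep (arr : List Int) (j : Nat) : List Int :=
  let a := arr.getD j 0
  let b := arr.getD (j + 1) 0
  if b < a then (arr.set j b).set (j + 1) a else arr

-- the nested 'for i in range(n): for j in range(0, n-i-1)' bubble sort A applies to each group
def bubbleSort (arr : List Int) : List Int :=
  let n := arr.length
  (List.range n).foldl (fun a i => (List.range (n - i - 1)).foldl bubStep a) arr

def group_by_parity_and_sort (nums : List Int) : List Int :=
  let p := nums.foldl
    (fun (p : List Int × List Int) num =>
      if PySem.Int.mod num 2 == 0 then (p.1 ++ [num], p.2) else (p.1, p.2 ++ [num]))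
    ([], [])
  bubbleSort p.1 ++ bubbleSort p.2

-- ===== PORT B =====
def group_by_parity_and_sort_alt (nums : List Int) : List Int :=
  let s := PySem.List.sorted nums (fun x => x) false
  let evens := s.filter (fun x => PySem.Int.mod x 2 == 0)
  let odds := s.filter (fun x => PySem.Int.mod x 2 != 0)
  evens ++ odds

-- ===== PRECONDITION & SPEC =====
def Spec_group_by_parity_and_sort (nums : List Int) (out : List Int) : Prop := out = group_by_parity_and_sort_alt nums
instance (nums : List Int) (out : List Int) : Decidable (Spec_group_by_parity_and_sort nums out) := by unfold Spec_group_by_parity_and_sort; infer_instance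

-- ===== CLAIM (what is proved, stated in full; the proofs are below) =====
def Claim_equal_group_by_parity_and_sort : Prop := ∀ (nums : List Int), Dom_group_by_parity_and_sort nums → Spec_group_by_parity_and_sort nums (group_by_parity_and_sort nums)

-- ===== LEMMAS AND PROOFS =====

-- structural description of one bubble bubPass (proof-side only)
def bubPass : List Int → List Int
  | [] => []
  | [a] => [a]
  | a :: b :: t => if b < a then b :: bubPass (a :: t) else a :: bubPass (b :: t)

theorem pass_perm (l : List Int) : (bubPass l).Perm l := by
  fun_induction bubPass with
  | case1 => simp
  | case2 a => simp
  | case3 a b t h ih =>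
      exact ((ih.cons b).trans (List.Perm.swap a b t))
  | case4 a b t h ih =>
      exact ih.cons a

theorem pass_ne_nil (l : List Int) (h : l ≠ []) : bubPass l ≠ [] := by
  intro hc
  exact h (List.Perm.eq_nil ((pass_perm l).symm.trans (hc ▸ List.Perm.refl _)))

theorem getLastD_irrel {α : Type} (l : List α) (h : l ≠ []) (d d' : α) :
    l.getLastD d = l.getLastD d' := by
  cases l with
  | nil => exact absurd rfl h
  | cons a t =>
    cases t with
    | nil => rfl
    | cons b u => rfl

theorem dropLast_append_getLastD {α : Type} : ∀ (l : List α), l ≠ [] → ∀ (d : α),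
    l.dropLast ++ [l.getLastD d] = l
  | [], h, _ => absurd rfl h
  | [a], _, d => rfl
  | a :: b :: u, _, d => by
    show a :: (b :: u).dropLast ++ [(b :: u).getLastD a] = a :: b :: u
    rw [List.cons_append, dropLast_append_getLastD (b :: u) (by simp) a]

theorem pass_le_last (l : List Int) (h : l ≠ []) :
    ∀ x ∈ bubPass l, x ≤ (bubPass l).getLastD 0 := by
  fun_induction bubPass with
  | case1 => simp at h
  | case2 a => simp
  | case3 a b t hlt ih =>
      have hne : bubPass (a :: t) ≠ [] := pass_ne_nil _ (by simp)
      have hlast : (b :: bubPass (a :: t)).getLastD 0 = (bubPass (a :: t)).getLastD 0 := by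
        rw [List.getLastD_cons, getLastD_irrel _ hne b 0]
      intro x hx
      rw [hlast]
      rcases List.mem_cons.mp hx with rfl | hx
      · have ha : a ∈ bubPass (a :: t) := ((pass_perm (a :: t)).mem_iff).mpr (by simp)
        exact le_trans (le_of_lt hlt) (ih (by simp) a ha)
      · exact ih (by simp) x hx
  | case4 a b t hlt ih =>
      have hne : bubPass (b :: t) ≠ [] := pass_ne_nil _ (by simp)
      have hlast : (a :: bubPass (b :: t)).getLastD 0 = (bubPass (b :: t)).getLastD 0 := by
        rw [List.getLastD_cons, getLastD_irrel _ hne a 0]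
      intro x hx
      rw [hlast]
      rcases List.mem_cons.mp hx with rfl | hx
      · have hb : b ∈ bubPass (b :: t) := ((pass_perm (b :: t)).mem_iff).mpr (by simp)
        exact le_trans (not_lt.mp hlt) (ih (by simp) b hb)
      · exact ih (by simp) x hx

theorem pass_length (l : List Int) : (bubPass l).length = l.length :=
  (pass_perm l).length_eq

-- appending one element to a bubPass: either it stays at the end or swaps with the carried maximum
theorem pass_append (T : List Int) (hT : T ≠ []) (d : Int) :
    bubPass (T ++ [d]) =
      if d < (bubPass T).getLastD 0 then (bubPass T).dropLast ++ [d, (bubPass T).getLastD 0]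
      else bubPass T ++ [d] := by
  fun_induction bubPass T with
  | case1 => exact absurd rfl hT
  | case2 a => by_cases h : d < a <;> simp [bubPass, h]
  | case3 a b t hlt ih =>
      have hne : bubPass (a :: t) ≠ [] := pass_ne_nil _ (by simp)
      have hih := ih (by simp)
      have hd1 : ((a :: t) ++ [d]) = a :: (t ++ [d]) := by simp
      have hshape : bubPass ((a :: b :: t) ++ [d]) = if b < a then b :: bubPass ((a :: t) ++ [d]) else a :: bubPass ((b :: t) ++ [d]) := by
        simp only [List.cons_append, bubPass]
      rw [hshape, if_pos hlt, hih]
      rw [List.getLastD_cons, getLastD_irrel _ hne b 0]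
      by_cases hd : d < (bubPass (a :: t)).getLastD 0
      · rw [if_pos hd, if_pos hd]
        rw [List.dropLast_cons_of_ne_nil hne]
        simp
      · rw [if_neg hd, if_neg hd]
        simp
  | case4 a b t hlt ih =>
      have hne : bubPass (b :: t) ≠ [] := pass_ne_nil _ (by simp)
      have hih := ih (by simp)
      have hshape : bubPass ((a :: b :: t) ++ [d]) = if b < a then b :: bubPass ((a :: t) ++ [d]) else a :: bubPass ((b :: t) ++ [d]) := by
        simp only [List.cons_append, bubPass]
      rw [hshape, if_neg hlt, hih]
      rw [List.getLastD_cons, getLastD_irrel _ hne a 0]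
      by_cases hd : d < (bubPass (b :: t)).getLastD 0
      · rw [if_pos hd, if_pos hd]
        rw [List.dropLast_cons_of_ne_nil hne]
        simp
      · rw [if_neg hd, if_neg hd]
        simp

def innerF (arr : List Int) (k : Nat) : List Int := (List.range k).foldl bubStep arr

theorem innerF_succ (arr : List Int) (k : Nat) :
    innerF arr (k + 1) = bubStep (innerF arr k) k := by
  simp [innerF, List.range_succ]

theorem bubStep_spec (Q : List Int) (p d : Int) (D : List Int) :
    bubStep (Q ++ p :: d :: D) Q.length =
      Q ++ (if d < p then d :: p :: D else p :: d :: D) := by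
  induction Q with
  | nil => by_cases h : d < p <;> simp [bubStep, h]
  | cons q Q ih =>
      simp only [bubStep] at ih ⊢
      by_cases h : d < p <;> simp [h] at ih ⊢

theorem innerF_spec : ∀ (k : Nat) (arr : List Int), k < arr.length →
    innerF arr k = bubPass (arr.take (k + 1)) ++ arr.drop (k + 1) := by
  intro k
  induction k with
  | zero =>
      intro arr h
      cases arr with
      | nil => simp at h
      | cons a t => simp [innerF, bubPass]
  | succ k ih =>
      intro arr h
      have hk : k < arr.length := Nat.lt_of_succ_lt h
      rw [innerF_succ, ih arr hk]
      have hget : arr.drop (k + 1) = arr[k + 1] :: arr.drop (k + 2) :=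
        List.drop_eq_getElem_cons h
      set Z := bubPass (arr.take (k + 1)) with hZ
      have hZne : Z ≠ [] := pass_ne_nil _ (by
        intro hnil
        have := congrArg List.length hnil
        simp [Nat.succ_le_of_lt hk] at this)
      have hZlen : Z.length = k + 1 := by
        rw [hZ, pass_length, List.length_take]
        omega
      have hZsplit : Z = Z.dropLast ++ [Z.getLastD 0] :=
        (dropLast_append_getLastD Z hZne 0).symm
      have hQlen : Z.dropLast.length = k := by
        rw [List.length_dropLast, hZlen]
        omega
      have step : bubStep (Z ++ arr.drop (k + 1)) k =
          Z.dropLast ++ (if arr[k + 1] < Z.getLastD 0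
            then arr[k + 1] :: Z.getLastD 0 :: arr.drop (k + 2)
            else Z.getLastD 0 :: arr[k + 1] :: arr.drop (k + 2)) := by
        conv_lhs => rw [hget, hZsplit]
        have := bubStep_spec Z.dropLast (Z.getLastD 0) arr[k + 1] (arr.drop (k + 2))
        rw [hQlen] at this
        simpa using this
      rw [step]
      have htake : arr.take (k + 2) = arr.take (k + 1) ++ [arr[k + 1]] :=
        List.take_succ_eq_append_getElem h
      rw [htake, pass_append _ (by
        intro hnil
        have := congrArg List.length hnil
        simp [Nat.succ_le_of_lt hk] at this) arr[k + 1], ← hZ]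
      by_cases hd : arr[k + 1] < Z.getLastD 0
      · rw [if_pos hd, if_pos hd]; simp
      · rw [if_neg hd, if_neg hd]; rw [hZsplit]; simp

-- outer-loop invariant: 'back' (of length i) is sorted and dominates 'front'
theorem sortRun (n : Nat) : ∀ (m i : Nat) (front back : List Int),
    front.length = m → back.length = i → i + m = n →
    List.Pairwise (· ≤ ·) back →
    (∀ x ∈ front, ∀ y ∈ back, x ≤ y) →
    ((List.range' i m).foldl (fun a j => innerF a (n - j - 1)) (front ++ back)).Perm (front ++ back) ∧
    List.Pairwise (· ≤ ·) ((List.range' i m).foldl (fun a j => innerF a (n - j - 1)) (front ++ back)) := by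
  intro m
  induction m with
  | zero =>
      intro i front back hf hb hn hsorted hcross
      have hfe : front = [] := List.eq_nil_of_length_eq_zero hf
      subst hfe
      simp only [List.range'_zero, List.foldl_nil, List.nil_append]
      exact ⟨List.Perm.refl _, hsorted⟩
  | succ m ih =>
      intro i front back hf hb hn hsorted hcross
      rw [List.range'_succ]
      simp only [List.foldl_cons]
      have hni : n - i - 1 = m := by omega
      rw [hni]
      have hlen : (front ++ back).length = n := by simp [hf, hb]; omega
      have hm : m < (front ++ back).length := by omega
      have htake : (front ++ back).take (m + 1) = front := by
        rw [← hf]; exact List.take_left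
      have hdrop : (front ++ back).drop (m + 1) = back := by
        rw [← hf]; exact List.drop_left
      rw [innerF_spec m (front ++ back) hm, htake, hdrop]
      set Z := bubPass front with hZ
      have hfne : front ≠ [] := by
        intro h; rw [h] at hf; simp at hf
      have hZne : Z ≠ [] := pass_ne_nil _ hfne
      have hZperm : Z.Perm front := pass_perm front
      have hZsplit : Z = Z.dropLast ++ [Z.getLastD 0] :=
        (dropLast_append_getLastD Z hZne 0).symm
      have hlast_mem : Z.getLastD 0 ∈ front := by
        apply hZperm.mem_iff.mp
        rw [hZsplit]; simp
      have hfront' : Z.dropLast.length = m := by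
        rw [List.length_dropLast, hZperm.length_eq, hf]
        omega
      have hback' : (Z.getLastD 0 :: back).length = i + 1 := by simp [hb]
      have hsorted' : List.Pairwise (· ≤ ·) (Z.getLastD 0 :: back) := by
        exact List.pairwise_cons.mpr ⟨fun y hy => hcross _ hlast_mem y hy, hsorted⟩
      have hcross' : ∀ x ∈ Z.dropLast, ∀ y ∈ Z.getLastD 0 :: back, x ≤ y := by
        intro x hx y hy
        have hxZ : x ∈ Z := by rw [hZsplit]; exact List.mem_append_left _ hx
        have hxf : x ∈ front := hZperm.mem_iff.mp hxZ
        rcases List.mem_cons.mp hy with rfl | hy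
        · exact pass_le_last front hfne x hxZ
        · exact hcross x hxf y hy
      have hassoc : Z ++ back = Z.dropLast ++ (Z.getLastD 0 :: back) := by
        conv_lhs => rw [hZsplit]
        simp
      rw [hassoc]
      obtain ⟨hperm, hpair⟩ := ih (i + 1) Z.dropLast (Z.getLastD 0 :: back)
        hfront' hback' (by omega) hsorted' hcross'
      refine ⟨hperm.trans ?_, hpair⟩
      rw [← hassoc]
      exact (hZperm.append_right back)

theorem bubbleSort_perm (arr : List Int) : (bubbleSort arr).Perm arr := by
  have h := sortRun arr.length arr.length 0 arr [] rfl rfl (by omega) (by simp) (by simp)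
  have : bubbleSort arr = (List.range' 0 arr.length).foldl
      (fun a j => innerF a (arr.length - j - 1)) (arr ++ []) := by
    simp [bubbleSort, innerF, List.range_eq_range']
  rw [this]
  simpa using h.1

theorem bubbleSort_sorted (arr : List Int) : List.Pairwise (· ≤ ·) (bubbleSort arr) := by
  have h := sortRun arr.length arr.length 0 arr [] rfl rfl (by omega) (by simp) (by simp)
  have : bubbleSort arr = (List.range' 0 arr.length).foldl
      (fun a j => innerF a (arr.length - j - 1)) (arr ++ []) := by
    simp [bubbleSort, innerF, List.range_eq_range']
  rw [this]
  simpa using h.2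

theorem pairFold (l : List Int) (e o : List Int) :
    l.foldl (fun (p : List Int × List Int) num =>
        if PySem.Int.mod num 2 == 0 then (p.1 ++ [num], p.2) else (p.1, p.2 ++ [num])) (e, o)
      = (e ++ l.filter (fun x => PySem.Int.mod x 2 == 0),
         o ++ l.filter (fun x => PySem.Int.mod x 2 != 0)) := by
  induction l generalizing e o with
  | nil => simp
  | cons a t ih =>
      by_cases h : (PySem.Int.mod a 2 == 0) = true
      · have h2 : (PySem.Int.mod a 2 != 0) = false := by
          show (!(PySem.Int.mod a 2 == 0)) = false
          rw [h]
          rfl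
        rw [List.foldl_cons, if_pos h, ih]
        simp only [List.filter_cons, h, h2]
        simp [List.append_assoc]
      · have h1 : (PySem.Int.mod a 2 == 0) = false := by
          rw [Bool.not_eq_true] at h
          exact h
        have h2 : (PySem.Int.mod a 2 != 0) = true := by
          show (!(PySem.Int.mod a 2 == 0)) = true
          rw [h1]
          rfl
        rw [List.foldl_cons, if_neg h, ih]
        simp only [List.filter_cons, h1, h2]
        simp [List.append_assoc]

-- sorted group = filtered global sort (via perm + sortedness + antisymmetry)
theorem group_eq (nums : List Int) (p : Int → Bool) :
    bubbleSort (nums.filter p) = (PySem.List.sorted nums (fun x => x) false).filter p := by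
  apply PySem.List.eq_of_perm_of_pairwise_le_of_injective (fun x : Int => x)
    (fun a b h => h)
  · exact (bubbleSort_perm _).trans
      ((PySem.List.sorted_perm nums (fun x => x) false).filter p).symm
  · exact bubbleSort_sorted _
  · exact (PySem.List.sorted_pairwise nums (fun x => x)).filter p

-- ===== VERDICT (by name: the statement is the Claim_ definition above) =====
theorem group_by_parity_and_sort_spec : Claim_equal_group_by_parity_and_sort := by
  intro nums _
  unfold Spec_group_by_parity_and_sort group_by_parity_and_sort group_by_parity_and_sort_alt
  rw [pairFold]
  simp only [List.nil_append]
  rw [group_eq nums (fun x => PySem.Int.mod x 2 == 0),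
      group_eq nums (fun x => PySem.Int.mod x 2 != 0)]
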